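-- pv_equiv track=rewrite | github.com/endredy/stemmerEval | script/evalStemmer.py | getBestStem
-- ===== SOURCE A (Python) =====
-- def getBestStem(stems):
--     longest=''
--     for s in stems:
--         if s is None:
--             return ''
--         if (len(longest) < len(s)):
--             longest=s
--     return longest
-- ===== SOURCE B (Python) =====
-- def getBestStem(stems):
--     # Sort-based: stable sort by length descending; the head is the first longest stem.
--     if any(s is None for s in stems):
--         return ''
--     ordered = sorted(stems, key=len, reverse=True)
--     return ordered[0] if ordered else ''
-- ===== Notes on version B (the rewrite author's own statement) =====
-- stated objective: alternative
-- what changed: Replaces A's single running-max loop with early return by a None scan followed by a stable descending sort by length, returning the head of the sorted list (stability makes it the first longest stem).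
import Mathlib
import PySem

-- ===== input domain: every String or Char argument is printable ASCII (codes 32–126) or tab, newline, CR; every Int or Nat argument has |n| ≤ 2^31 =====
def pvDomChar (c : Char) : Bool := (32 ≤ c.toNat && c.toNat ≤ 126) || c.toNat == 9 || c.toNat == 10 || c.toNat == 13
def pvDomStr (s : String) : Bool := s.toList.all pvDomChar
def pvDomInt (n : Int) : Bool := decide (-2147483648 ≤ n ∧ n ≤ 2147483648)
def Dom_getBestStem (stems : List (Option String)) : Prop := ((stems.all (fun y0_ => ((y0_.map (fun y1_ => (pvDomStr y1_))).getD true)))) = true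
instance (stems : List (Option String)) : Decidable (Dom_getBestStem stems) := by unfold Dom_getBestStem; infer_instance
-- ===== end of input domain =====

-- B replaces A's running-max loop (early return on None) by a None scan plus a stable
-- descending sort by length, taking the head of the sorted list (objective: alternative).

-- ===== PORT A =====
-- A's loop: accumulator `longest`, early return '' on None
def getBestStemGo (longest : String) : List (Option String) → String
  | [] => longest
  | s :: rest =>
    match s with
    | none => ""
    | some s => getBestStemGo (if PySem.Str.len longest < PySem.Str.len s then s else longest) rest

def getBestStem (stems : List (Option String)) : String :=
  getBestStemGo "" stems

-- ===== PORT B =====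
-- sorted(stems, key=len, reverse=True); all elements are some _ here, so len is
-- taken of the string (ported as `.getD ""` to unwrap the guaranteed-some option)
def getBestStem_alt (stems : List (Option String)) : String :=
  if stems.any (fun s => s.isNone) then ""
  else
    match PySem.List.sorted (stems.map (fun s => s.getD "")) (fun s => PySem.Str.len s) true with
    | [] => ""
    | x :: _ => x

-- ===== PRECONDITION & SPEC =====
def Spec_getBestStem (stems : List (Option String)) (out : String) : Prop := out = getBestStem_alt stems
instance (stems : List (Option String)) (out : String) : Decidable (Spec_getBestStem stems out) := by unfold Spec_getBestStem; infer_instance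

-- ===== CLAIM (what is proved, stated in full; the proofs are below) =====
def Claim_equal_getBestStem : Prop := ∀ (stems : List (Option String)), Dom_getBestStem stems → Spec_getBestStem stems (getBestStem stems)

-- ===== LEMMAS AND PROOFS =====

-- the first-longest step function shared by the proofs
def pvStep (m s : String) : String := if PySem.Str.len m < PySem.Str.len s then s else m

-- Python's reverse=True insertion step for key=len
def pvIns (acc : List String) (x : String) : List String :=
  PySem.List.insertBy (fun a b => decide (PySem.Str.len b < PySem.Str.len a)) x acc

theorem getBestStemGo_none (stems : List (Option String)) (longest : String)
    (h : none ∈ stems) : getBestStemGo longest stems = "" := by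
  induction stems generalizing longest with
  | nil => cases h
  | cons s rest ih =>
    cases s with
    | none => rfl
    | some s =>
      simp only [List.mem_cons, reduceCtorEq, false_or] at h
      simp only [getBestStemGo]
      exact ih _ h

theorem getBestStemGo_some (stems : List (Option String)) (longest : String)
    (h : ¬ none ∈ stems) :
    getBestStemGo longest stems = (stems.map (fun s => s.getD "")).foldl pvStep longest := by
  induction stems generalizing longest with
  | nil => rfl
  | cons s rest ih =>
    cases s with
    | none => exact absurd (List.mem_cons_self) h
    | some s =>
      simp only [List.mem_cons, reduceCtorEq, false_or] at h
      simp only [getBestStemGo, List.map, List.foldl, Option.getD]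
      exact ih _ h

-- head of the insertion-sort fold over a nonempty accumulator = first-longest fold
theorem head_ins_fold (xs : List String) (h : String) (t : List String) :
    ∃ t', xs.foldl pvIns (h :: t) = (xs.foldl pvStep h) :: t' := by
  induction xs generalizing h t with
  | nil => exact ⟨t, rfl⟩
  | cons x rest ih =>
    simp only [List.foldl]
    have hlen : ∀ a b : String, (PySem.Str.len a < PySem.Str.len b) ↔ a.length < b.length := by
      intro a b
      rw [PySem.Str.len_eq a, PySem.Str.len_eq b]
      simp
    by_cases hx : h.length < x.length
    · have : pvIns (h :: t) x = x :: h :: t := by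
        simp [pvIns, PySem.List.insertBy, hx]
      rw [this]
      have hs : pvStep h x = x := by simp [pvStep, hlen, hx]
      rw [hs]
      exact ih x (h :: t)
    · have : pvIns (h :: t) x =
        h :: PySem.List.insertBy (fun a b => decide (PySem.Str.len b < PySem.Str.len a)) x t := by
        simp [pvIns, PySem.List.insertBy, hx]
      rw [this]
      have hs : pvStep h x = h := by simp [pvStep, hlen, hx]
      rw [hs]
      exact ih h _

theorem pvStep_empty (x : String) : pvStep "" x = x := by
  simp only [pvStep, PySem.Str.len_eq]
  split
  · rfl
  · rename_i hle
    have h0 : (("" : String).toList.length : Int) = 0 := by decide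
    have : x.toList.length = 0 := by omega
    exact (String.toList_eq_nil_iff.mp (List.length_eq_zero_iff.mp this)).symm

-- head of sorted(l, key=len, reverse=True) (with '' for empty) = A's fold from ''
theorem sorted_head_eq (l : List String) :
    (match PySem.List.sorted l (fun s => PySem.Str.len s) true with
      | [] => ""
      | x :: _ => x) = l.foldl pvStep "" := by
  rw [PySem.List.sorted_rev_eq_foldl_insertBy]
  cases l with
  | nil => rfl
  | cons x rest =>
    simp only [List.foldl]
    have h1 : PySem.List.insertBy (fun a b => decide (PySem.Str.len b < PySem.Str.len a)) x [] = [x] := rfl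
    rw [h1, pvStep_empty]
    obtain ⟨t', ht⟩ := head_ins_fold rest x []
    have h2 : List.foldl (fun acc y => PySem.List.insertBy
        (fun a b => decide (PySem.Str.len b < PySem.Str.len a)) y acc) [x] rest
        = rest.foldl pvIns [x] := rfl
    rw [h2, ht]

-- ===== VERDICT (by name: the statement is the Claim_ definition above) =====
theorem getBestStem_spec : Claim_equal_getBestStem := by
  intro stems _
  unfold Spec_getBestStem getBestStem getBestStem_alt
  by_cases h : none ∈ stems
  · have hany : stems.any (fun s => s.isNone) = true := by
      simp only [List.any_eq_true]
      exact ⟨none, h, rfl⟩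
    rw [if_pos hany, getBestStemGo_none _ _ h]
  · have hany : stems.any (fun s => s.isNone) = false := by
      simp only [List.any_eq_false]
      intro x hx
      cases x with
      | none => exact absurd hx h
      | some s => simp
    rw [if_neg (by simp [hany]), getBestStemGo_some _ _ h, sorted_head_eq]
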